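-- pv_equiv track=rewrite | github.com/arm/device-connect | packages/device-connect-server/device_connect_server/portal/services/tokens.py | validate_scopes
-- ===== SOURCE A (Python) =====
-- KNOWN_SCOPES = frozenset({
--     "devices:read",
--     "devices:provision",
--     "devices:credentials",
--     "devices:invoke",
--     "events:read",
--     "admin:tenants",
--     "admin:*",
-- })
--
-- def validate_scopes(scopes: list[str]) -> list[str]:
--     """Return a sorted, de-duped, validated scope list. Raises ValueError on unknown."""
--     cleaned = []
--     seen = set()
--     for s in scopes:
--         s = s.strip()
--         if not s or s in seen:
--             continue
--         if s not in KNOWN_SCOPES: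
--             raise ValueError(f"Unknown scope: {s}")
--         cleaned.append(s)
--         seen.add(s)
--     cleaned.sort()
--     return cleaned
-- ===== SOURCE B (Python) =====
-- KNOWN_SCOPES = frozenset({
--     "devices:read",
--     "devices:provision",
--     "devices:credentials",
--     "devices:invoke",
--     "events:read",
--     "admin:tenants",
--     "admin:*",
-- })
--
-- def validate_scopes(scopes: list[str]) -> list[str]:
--     """Return a sorted, de-duped, validated scope list. Raises ValueError on unknown."""
--     for s in scopes:
--         t = s.strip()
--         if t and t not in KNOWN_SCOPES:
--             raise ValueError(f"Unknown scope: {t}")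
--     return sorted({s.strip() for s in scopes if s.strip()})
-- ===== Notes on version B (the rewrite author's own statement) =====
-- stated objective: simpler
-- what changed: A's single interleaved loop maintaining cleaned+seen is split into a validation-only pass (preserving the order-sensitive error) and a one-line sorted set comprehension for the result.
import Mathlib
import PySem

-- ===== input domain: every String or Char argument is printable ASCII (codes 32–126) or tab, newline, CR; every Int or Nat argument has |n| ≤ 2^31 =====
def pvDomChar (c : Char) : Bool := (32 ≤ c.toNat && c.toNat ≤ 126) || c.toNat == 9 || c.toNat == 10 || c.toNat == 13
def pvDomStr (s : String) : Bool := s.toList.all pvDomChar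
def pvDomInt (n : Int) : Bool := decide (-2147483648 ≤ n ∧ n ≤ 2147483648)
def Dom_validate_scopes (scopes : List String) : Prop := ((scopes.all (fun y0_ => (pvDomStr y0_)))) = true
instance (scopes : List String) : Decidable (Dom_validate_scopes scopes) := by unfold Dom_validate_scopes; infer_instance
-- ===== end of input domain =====

-- B splits A's single interleaved loop into a validation-only pass plus a sorted set comprehension (simpler decomposition; return value only — neither mutates its argument).

def knownScopes : List String :=
  ["devices:read", "devices:provision", "devices:credentials", "devices:invoke",
   "events:read", "admin:tenants", "admin:*"]

-- ===== PORT A =====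
-- A's loop: state (cleaned, seen); none = the ValueError raise (excluded by Pre_).
def vsLoopA : List String → List String → PySem.Set String → Option (List String × PySem.Set String)
  | [], cleaned, seen => some (cleaned, seen)
  | s :: rest, cleaned, seen =>
    let t := PySem.Str.strip s
    if t == "" || PySem.Set.contains seen t then
      vsLoopA rest cleaned seen
    else if !(knownScopes.contains t) then
      none
    else
      vsLoopA rest (cleaned ++ [t]) (PySem.Set.add seen t)

def validate_scopes (scopes : List String) : List String :=
  match vsLoopA scopes [] PySem.Set.empty with
  | some (cleaned, _) => PySem.List.sorted cleaned (fun x => x) false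
  | none => []  -- unreachable under Pre_ (Python raises ValueError here)

-- ===== PORT B =====
-- B's validation-only pass: false = the ValueError raise (excluded by Pre_).
def vsCheckB : List String → Bool
  | [] => true
  | s :: rest =>
    let t := PySem.Str.strip s
    if !(t == "") && !(knownScopes.contains t) then false else vsCheckB rest

def validate_scopes_alt (scopes : List String) : List String :=
  if vsCheckB scopes then
    PySem.List.sorted
      (PySem.Set.ofList ((scopes.map PySem.Str.strip).filter (fun t => !(t == ""))))
      (fun x => x) false
  else []  -- unreachable under Pre_ (Python raises ValueError here)

-- ===== PRECONDITION & SPEC =====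
-- Pre_ excludes exactly the inputs containing a non-empty stripped scope outside KNOWN_SCOPES, where A raises ValueError.
def Pre_validate_scopes (scopes : List String) : Prop :=
  ∀ s ∈ scopes, PySem.Str.strip s = "" ∨ knownScopes.contains (PySem.Str.strip s) = true
instance (scopes : List String) : Decidable (Pre_validate_scopes scopes) := by
  unfold Pre_validate_scopes; infer_instance

def pvWitness_validate_scopes : List String :=
  [" devices:read ", "devices:read", "", "  ", "events:read", "admin:*"]

def Spec_validate_scopes (scopes : List String) (out : List String) : Prop := out = validate_scopes_alt scopes
instance (scopes : List String) (out : List String) : Decidable (Spec_validate_scopes scopes out) := by unfold Spec_validate_scopes; infer_instance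

-- ===== CLAIM (what is proved, stated in full; the proofs are below) =====
def Claim_equal_validate_scopes : Prop := ∀ (scopes : List String), Dom_validate_scopes scopes → Pre_validate_scopes scopes → Spec_validate_scopes scopes (validate_scopes scopes)

-- ===== LEMMAS AND PROOFS =====

-- Under Pre_, A's loop run with cleaned = seen never raises and both components equal
-- the fold of Set.add over the stripped, non-empty scopes (i.e. set-comprehension order).
lemma vsLoopA_eq (l : List String) (acc : List String)
    (h : ∀ s ∈ l, PySem.Str.strip s = "" ∨ knownScopes.contains (PySem.Str.strip s) = true) :
    vsLoopA l acc acc =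
      some (((l.map PySem.Str.strip).filter (fun t => !(t == ""))).foldl PySem.Set.add acc,
            ((l.map PySem.Str.strip).filter (fun t => !(t == ""))).foldl PySem.Set.add acc) := by
  induction l generalizing acc with
  | nil => simp [vsLoopA]
  | cons s rest ih =>
    have hs := h s (List.mem_cons_self ..)
    have hrest : ∀ x ∈ rest, PySem.Str.strip x = "" ∨ knownScopes.contains (PySem.Str.strip x) = true :=
      fun x hx => h x (List.mem_cons_of_mem _ hx)
    by_cases he : PySem.Str.strip s = ""
    · simp [vsLoopA, he, ih _ hrest]
    · have hk : knownScopes.contains (PySem.Str.strip s) = true := hs.resolve_left he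
      have hk' : PySem.Str.strip s ∈ knownScopes := by
        simpa using hk
      by_cases hmem : PySem.Str.strip s ∈ acc
      · simp [vsLoopA, he, hmem, ih _ hrest]
      · simp only [vsLoopA, List.map_cons, List.filter_cons]
        simp [he, hmem, hk', ih _ hrest]

lemma vsCheckB_true (l : List String)
    (h : ∀ s ∈ l, PySem.Str.strip s = "" ∨ knownScopes.contains (PySem.Str.strip s) = true) :
    vsCheckB l = true := by
  induction l with
  | nil => rfl
  | cons s rest ih =>
    have hs := h s (List.mem_cons_self ..)
    have hrest := ih (fun x hx => h x (List.mem_cons_of_mem _ hx))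
    rcases hs with he | hk
    · simp [vsCheckB, he, hrest]
    · have hk' : PySem.Str.strip s ∈ knownScopes := by simpa using hk
      simp [vsCheckB, hk', hrest]

-- ===== VERDICT (by name: the statement is the Claim_ definition above) =====
theorem validate_scopes_spec : Claim_equal_validate_scopes := by
  intro scopes _ hpre
  unfold Spec_validate_scopes validate_scopes validate_scopes_alt
  rw [vsCheckB_true scopes hpre]
  have h := vsLoopA_eq scopes [] hpre
  simp only [PySem.Set.empty] at *
  rw [h]
  simp [PySem.Set.ofList_eq_foldl]
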